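-- pv_equiv track=rewrite | github.com/tnakaicode/jburkardt-python | combo/rgf_check.py | rgf_check
-- ===== SOURCE A (Python) =====
-- def rgf_check ( m, f ):
--
-- #*****************************************************************************80
-- #
-- ## RGF_CHECK checks a restricted growth function.
-- #
-- #  Licensing:
-- #
-- #    This code is distributed under the GNU LGPL license.
-- #
-- #  Modified:
-- #
-- #    31 December 2015
-- #
-- #  Author:
-- #
-- #    John Burkardt
-- #
-- #  Reference:
-- #
-- #    Donald Kreher, Douglas Simpson,
-- #    Combinatorial Algorithms,
-- #    CRC Press, 1998,
-- #    ISBN: 0-8493-3988-X,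
-- #    LC: QA164.K73.
-- #
-- #  Parameters:
-- #
-- #    Input, integer M, the domain of the RGF is the integers
-- #    from 1 to M.  M must be positive.
-- #
-- #    Input, integer F(M), the restricted growth function.
-- #
-- #    Output, bool CHECK.
-- #    True, the data is legal.
-- #    False, the data is not legal.
-- #
--   check = True
--
--   if ( m <= 0 ):
--     check = False
--     return check
--
--   fmax = 0
--   for i in range ( 0, m ):
--     if ( f[i] <= 0 or fmax + 1 < f[i] ):
--       check = False
--       return check
--     fmax = max ( fmax, f[i] )
--
--   return check
-- ===== SOURCE B (Python) =====
-- def rgf_check(m, f):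
--     if m <= 0:
--         return False
--     vals = [f[i] for i in range(m)]
--     thresholds = [0]
--     for v in vals:
--         thresholds.append(max(thresholds[-1], v))
--     return all(1 <= v <= t + 1 for v, t in zip(vals, thresholds))
-- ===== Notes on version B (the rewrite author's own statement) =====
-- stated objective: alternative
-- what changed: Replaces A's fused single pass (running max with early return) by a build-then-validate decomposition: materialise the prefix-maximum table of strictly-preceding maxima, then check every element with one zip/all pass.
-- outside the precondition, e.g. on rgf_check(3, [0]): A returns False, B raises IndexError
import Mathlib
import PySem

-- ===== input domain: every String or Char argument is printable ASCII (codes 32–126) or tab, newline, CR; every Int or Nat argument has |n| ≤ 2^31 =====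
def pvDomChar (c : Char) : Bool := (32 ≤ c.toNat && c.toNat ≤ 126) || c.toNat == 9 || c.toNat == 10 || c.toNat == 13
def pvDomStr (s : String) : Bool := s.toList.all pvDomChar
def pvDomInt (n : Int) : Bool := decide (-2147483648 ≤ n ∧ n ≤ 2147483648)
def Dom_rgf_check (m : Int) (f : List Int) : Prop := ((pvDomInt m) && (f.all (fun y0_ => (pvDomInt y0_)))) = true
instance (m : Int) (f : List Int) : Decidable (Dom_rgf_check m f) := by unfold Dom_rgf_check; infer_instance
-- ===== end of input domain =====

-- B replaces A's fused running-max pass with early return by a build-table-then-validate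
-- decomposition (prefix-maximum table, then one zip/all check); same cost, different structure.

-- ===== PORT A =====
-- the 'for i in range(0, m)' loop of A, with its early returns; pyGet? none = IndexError (excluded by Pre_)
def rgfA_loop (f : List Int) (is : List Int) (fmax : Int) : Bool :=
  match is with
  | [] => true
  | i :: rest =>
    match PySem.List.pyGet? f i with
    | none => false  -- IndexError in Python; unreachable inside Pre_
    | some fi =>
      if fi ≤ 0 || fmax + 1 < fi then false
      else rgfA_loop f rest (max fmax fi)

def rgf_check (m : Int) (f : List Int) : Bool :=
  if m ≤ 0 then false
  else rgfA_loop f (PySem.List.pyRange 0 m 1) 0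

-- ===== PORT B =====
-- thresholds table: starts at [0], appends max(last, v) for each v (B builds it with a loop)
def rgfB_thresh (t : Int) (vals : List Int) : List Int :=
  match vals with
  | [] => [t]
  | v :: rest => t :: rgfB_thresh (max t v) rest

def rgf_check_alt (m : Int) (f : List Int) : Bool :=
  if m ≤ 0 then false
  else
    let vals := (PySem.List.pyRange 0 m 1).map (fun i => (PySem.List.pyGet? f i).getD 0)
    let thresholds := rgfB_thresh 0 vals
    (vals.zip thresholds).all (fun vt => decide (1 ≤ vt.1) && decide (vt.1 ≤ vt.2 + 1))

-- ===== PRECONDITION & SPEC =====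
-- Pre_ excludes 0 < m with f shorter than m: there both programs eventually hit an IndexError,
-- but A's early return may yield False before reaching the bad index while B reads all of
-- f[0..m-1] up front and raises — a defensible-corner artefact of A's fused pass.
def Pre_rgf_check (m : Int) (f : List Int) : Prop := m ≤ 0 ∨ m ≤ (f.length : Int)
instance (m : Int) (f : List Int) : Decidable (Pre_rgf_check m f) := by unfold Pre_rgf_check; infer_instance
def pvWitness_rgf_check : Int × List Int := (3, [1, 1, 2])
def Spec_rgf_check (m : Int) (f : List Int) (out : Bool) : Prop := out = rgf_check_alt m f
instance (m : Int) (f : List Int) (out : Bool) : Decidable (Spec_rgf_check m f out) := by unfold Spec_rgf_check; infer_instance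

-- ===== CLAIM (what is proved, stated in full; the proofs are below) =====
def Claim_equal_rgf_check : Prop := ∀ (m : Int) (f : List Int), Dom_rgf_check m f → Pre_rgf_check m f → Spec_rgf_check m f (rgf_check m f)

-- ===== LEMMAS AND PROOFS =====

-- A's loop over any value list (indices already resolved)
def rgfA_vals (vals : List Int) (fmax : Int) : Bool :=
  match vals with
  | [] => true
  | v :: rest => if v ≤ 0 || fmax + 1 < v then false else rgfA_vals rest (max fmax v)

-- the core equivalence: fused pass = table-then-validate, for any running max t
theorem rgfA_vals_eq_zip_all (vals : List Int) (t : Int) :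
    rgfA_vals vals t
      = (vals.zip (rgfB_thresh t vals)).all (fun vt => decide (1 ≤ vt.1) && decide (vt.1 ≤ vt.2 + 1)) := by
  induction vals generalizing t with
  | nil => rfl
  | cons v rest ih =>
    simp only [rgfA_vals, rgfB_thresh, List.zip_cons_cons, List.all_cons]
    by_cases h : v ≤ 0 ∨ t + 1 < v
    · have hb : (decide (v ≤ 0) || decide (t + 1 < v)) = true := by
        rcases h with h | h <;> simp [h]
      have hc : (decide (1 ≤ v) && decide (v ≤ t + 1)) = false := by
        rcases h with h | h <;> simp <;> omega
      simp [hb, hc]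
    · push Not at h
      have hb : (decide (v ≤ 0) || decide (t + 1 < v)) = false := by
        simp; omega
      have hc : (decide (1 ≤ v) && decide (v ≤ t + 1)) = true := by
        simp; omega
      simp [hb, hc, ih]

-- A's index loop resolves to the value loop when every index is in range
theorem rgfA_loop_eq_vals (f : List Int) (is : List Int) (t : Int)
    (h : ∀ i ∈ is, 0 ≤ i ∧ i < (f.length : Int)) :
    rgfA_loop f is t = rgfA_vals (is.map (fun i => (PySem.List.pyGet? f i).getD 0)) t := by
  induction is generalizing t with
  | nil => rfl
  | cons i rest ih =>
    obtain ⟨h0, hl⟩ := h i (by simp)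
    have hv := PySem.List.pyGet?_eq_some_getElem (xs := f) (i := i) (by omega) (by omega)
    simp only [rgfA_loop, rgfA_vals, List.map_cons, hv, Option.getD_some]
    split
    · rfl
    · exact ih _ (fun j hj => h j (by simp [hj]))

-- ===== VERDICT (by name: the statement is the Claim_ definition above) =====
theorem rgf_check_spec : Claim_equal_rgf_check := by
  intro m f _ hpre
  unfold Spec_rgf_check rgf_check rgf_check_alt
  by_cases hm : m ≤ 0
  · simp [hm]
  · simp only [if_neg hm]
    rw [rgfA_loop_eq_vals]
    · exact rgfA_vals_eq_zip_all _ 0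
    · intro i hi
      rw [PySem.List.mem_pyRange_one] at hi
      rcases hpre with h | h
      · omega
      · omega
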